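-- pv_equiv track=rewrite | github.com/kh277/BOJ | 백준/Silver/25215. 타이핑/타이핑.py | solve
-- ===== SOURCE A (Python) =====
-- def solve(string: str) -> int:
--     change = []
--
--     # 첫 시작이 대문자일 경우 -> 변경 체크
--     if string[0].isupper():
--         change.append(0)
--
--     # i-1번째 문자와 i번째 문자가 다를 경우 -> 변경 체크
--     for i in range(1, len(string)):
--         if string[i-1].isupper() == string[i].islower():
--             change.append(i)
--
--     counter = 0     # 2번 연속해서 변경되는 문자열 수
--     index = 0       # change 배열 인덱스
--     while True:
--         # 탈출 조건
--         if index >= len(change)-1: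
--             break
--
--         # index번째와 index+1번째 변경 값이 붙어있는 경우 -> 카운터+1
--         if change[index+1] - change[index] == 1:
--             counter += 1
--             index += 2
--         # 붙어있지 않은 경우
--         else:
--             index += 1
--             continue
--
--     result = len(string) + len(change) - counter
--
--     return result
-- ===== SOURCE B (Python) =====
-- def solve(string: str) -> int:
--     toggles = 0   # number of case-change positions
--     counter = 0   # greedily paired adjacent changes
--     last = -2     # position of the last change
--     free = False  # is the last change still unpaired?
--     for i in range(len(string)):
--         if (string[i].isupper() if i == 0
--                 else string[i-1].isupper() == string[i].islower()):
--             toggles += 1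
--             if free and i - last == 1:
--                 counter += 1
--                 free = False
--             else:
--                 last = i
--                 free = True
--     return len(string) + toggles - counter
-- ===== Notes on version B (the rewrite author's own statement) =====
-- stated objective: simpler
-- what changed: B replaces A's two-phase algorithm (build a list of change positions, then a second index-jumping while loop over that list) by a single left-to-right pass over the string that keeps only scalars (toggle count, pair count, last toggle position, a free flag) and never materialises the change list.
import Mathlib
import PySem

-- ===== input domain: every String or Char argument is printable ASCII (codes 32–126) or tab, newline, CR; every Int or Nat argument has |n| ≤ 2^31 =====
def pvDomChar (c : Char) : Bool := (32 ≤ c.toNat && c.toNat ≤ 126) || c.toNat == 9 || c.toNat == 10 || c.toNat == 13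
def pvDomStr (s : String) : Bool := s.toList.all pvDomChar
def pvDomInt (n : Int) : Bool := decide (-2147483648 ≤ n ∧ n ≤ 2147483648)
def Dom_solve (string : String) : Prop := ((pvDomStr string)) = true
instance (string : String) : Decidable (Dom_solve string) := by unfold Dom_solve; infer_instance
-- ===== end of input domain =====

-- B replaces A's build-change-list-then-scan-it algorithm by a single scalar-state pass over the string (objective: simpler).


-- ===== PORT A =====
-- the 'while True' loop: state (counter, index); fuel (= len change at the call site) only makes it total,
-- the loop breaks within change.length iterations since index grows by 1 or 2 each round
def solveWhileA (change : List Int) : Nat → Int → Int → Int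
  | 0, counter, _ => counter
  | fuel + 1, counter, index =>
    if (change.length : Int) - 1 ≤ index then counter
    else if PySem.List.pyGetD change (index + 1) 0 - PySem.List.pyGetD change index 0 = 1 then
      solveWhileA change fuel (counter + 1) (index + 2)
    else
      solveWhileA change fuel counter (index + 1)

def solve (string : String) : Int :=
  let cs := string.toList
  -- string[0] raises IndexError on the empty string: pyGetD is exact under Pre_solve (string ≠ "")
  let change : List Int :=
    if PySem.Chars.isupper (PySem.List.pyGetD cs 0 ' ') then [0] else []
  let change :=
    (PySem.List.pyRange 1 (cs.length : Int) 1).foldl (fun ch i =>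
      if PySem.Chars.isupper (PySem.List.pyGetD cs (i - 1) ' ')
           == PySem.Chars.islower (PySem.List.pyGetD cs i ' ') then ch ++ [i] else ch) change
  let counter := solveWhileA change change.length 0 0
  (cs.length : Int) + (change.length : Int) - counter

-- ===== PORT B =====
-- loop body of Source B's single for-loop; state = (toggles, counter, last, free)
def solveStepB (cs : List Char) (st : Int × Int × Int × Bool) (i : Int) : Int × Int × Int × Bool :=
  let (toggles, counter, last, free) := st
  if (if i = 0 then PySem.Chars.isupper (PySem.List.pyGetD cs i ' ')
      else PySem.Chars.isupper (PySem.List.pyGetD cs (i - 1) ' ')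
             == PySem.Chars.islower (PySem.List.pyGetD cs i ' ')) then
    if free ∧ i - last = 1 then (toggles + 1, counter + 1, last, false)
    else (toggles + 1, counter, i, true)
  else (toggles, counter, last, free)

def solve_alt (string : String) : Int :=
  let cs := string.toList
  let st := (PySem.List.pyRange 0 (cs.length : Int) 1).foldl (solveStepB cs) (0, 0, -2, false)
  (cs.length : Int) + st.1 - st.2.1

-- ===== PRECONDITION & SPEC =====
-- Pre_ excludes exactly the empty string, on which A raises IndexError at string[0]
def Pre_solve (string : String) : Prop := string ≠ ""
instance (string : String) : Decidable (Pre_solve string) := by unfold Pre_solve; infer_instance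
def pvWitness_solve : String := "aA"

def Spec_solve (string : String) (out : Int) : Prop := out = solve_alt string
instance (string : String) (out : Int) : Decidable (Spec_solve string out) := by unfold Spec_solve; infer_instance

-- ===== CLAIM (what is proved, stated in full; the proofs are below) =====
def Claim_equal_solve : Prop := ∀ (string : String), Dom_solve string → Pre_solve string → Spec_solve string (solve string)

-- ===== LEMMAS AND PROOFS =====

-- the toggle condition both programs test at position i
def condAt (cs : List Char) (i : Int) : Bool :=
  if i = 0 then PySem.Chars.isupper (PySem.List.pyGetD cs i ' ')
  else PySem.Chars.isupper (PySem.List.pyGetD cs (i - 1) ' ')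
         == PySem.Chars.islower (PySem.List.pyGetD cs i ' ')

-- greedy count of adjacent pairs in a list of change positions
def pairs : List Int → Int
  | [] => 0
  | [_] => 0
  | a :: b :: rest => if b - a = 1 then 1 + pairs rest else pairs (b :: rest)
termination_by l => l.length

theorem pairs_short (l : List Int) (h : l.length ≤ 1) : pairs l = 0 := by
  match l, h with
  | [], _ => simp [pairs]
  | [_], _ => simp [pairs]

theorem solveWhileA_eq_pairs (change : List Int) :
    ∀ fuel (index : Nat) (counter : Int), change.length ≤ index + fuel →
      solveWhileA change fuel counter (index : Int) = counter + pairs (change.drop index) := by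
  intro fuel
  induction fuel with
  | zero =>
    intro index counter h
    have hnil : change.drop index = [] := List.drop_eq_nil_of_le (by omega)
    simp [solveWhileA, hnil, pairs]
  | succ fuel ih =>
    intro index counter h
    rw [solveWhileA]
    by_cases hbr : (change.length : Int) - 1 ≤ (index : Int)
    · rw [if_pos hbr, pairs_short _ (by simp; omega)]; ring
    · rw [if_neg hbr]
      have hlt : index + 1 < change.length := by omega
      have hd : change.drop index = change[index] :: change[index + 1] :: change.drop (index + 2) := by
        rw [List.drop_eq_getElem_cons (by omega), List.drop_eq_getElem_cons (by omega)]
      have g1 : PySem.List.pyGetD change ((index : Int) + 1) 0 = change[index + 1] := by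
        have := PySem.List.pyGetD_natCast (xs := change) (n := index + 1) (d := 0)
        simp [List.getD, List.getElem?_eq_getElem (by omega : index + 1 < change.length)] at this
        simp [← this]
      have g0 : PySem.List.pyGetD change ((index : Int)) 0 = change[index] := by
        have := PySem.List.pyGetD_natCast (xs := change) (n := index) (d := 0)
        simpa [List.getD, List.getElem?_eq_getElem (by omega : index < change.length)] using this
      rw [g1, g0]
      by_cases hadj : change[index + 1] - change[index] = 1
      · rw [if_pos hadj]
        have : ((index : Int) + 2) = ((index + 2 : Nat) : Int) := by push_cast; ring
        rw [this, ih (index + 2) (counter + 1) (by omega), hd, pairs, if_pos hadj]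
        ring
      · rw [if_neg hadj]
        have : ((index : Int) + 1) = ((index + 1 : Nat) : Int) := by push_cast; ring
        rw [this, ih (index + 1) counter (by omega), hd, pairs, if_neg hadj]
        rw [List.drop_eq_getElem_cons (by omega : index + 1 < change.length)]

-- the pure toggle step (what solveStepB does on positions where the condition holds)
def tog (st : Int × Int × Int × Bool) (i : Int) : Int × Int × Int × Bool :=
  if st.2.2.2 ∧ i - st.2.2.1 = 1 then (st.1 + 1, st.2.1 + 1, st.2.2.1, false)
  else (st.1 + 1, st.2.1, i, true)

theorem foldl_stepB_filter (cs : List Char) (l : List Int) :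
    ∀ st, l.foldl (solveStepB cs) st = (l.filter (condAt cs)).foldl tog st := by
  induction l with
  | nil => intro st; rfl
  | cons a rest ih =>
    intro st
    by_cases h : condAt cs a
    · have : solveStepB cs st a = tog st a := by
        obtain ⟨t, c, last, free⟩ := st
        simp only [solveStepB, tog, condAt] at h ⊢
        rw [if_pos h]
      simp [h, this, ih]
    · have : solveStepB cs st a = st := by
        obtain ⟨t, c, last, free⟩ := st
        simp only [solveStepB, condAt] at h ⊢
        rw [if_neg h]
      simp [h, this, ih]

theorem foldl_tog_spec (l : List Int) :
    ∀ (t c last : Int) (free : Bool),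
      (l.foldl tog (t, c, last, free)).1 = t + l.length ∧
      (l.foldl tog (t, c, last, free)).2.1 =
        c + (if free then pairs (last :: l) else pairs l) := by
  induction l with
  | nil => intro t c last free; cases free <;> simp [pairs_short]
  | cons a rest ih =>
    intro t c last free
    cases free with
    | false =>
      have hstep : tog (t, c, last, false) a = (t + 1, c, a, true) := by simp [tog]
      simp only [List.foldl_cons, hstep]
      have := ih (t + 1) c a true
      constructor
      · rw [this.1]; push_cast [List.length_cons]; ring
      · rw [this.2]; simp
    | true =>
      by_cases hadj : a - last = 1
      · have hstep : tog (t, c, last, true) a = (t + 1, c + 1, last, false) := by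
          simp [tog, hadj]
        simp only [List.foldl_cons, hstep]
        have := ih (t + 1) (c + 1) last false
        constructor
        · rw [this.1]; push_cast [List.length_cons]; ring
        · rw [this.2]; simp [pairs, hadj]; ring
      · have hstep : tog (t, c, last, true) a = (t + 1, c, a, true) := by
          simp [tog, hadj]
        simp only [List.foldl_cons, hstep]
        have := ih (t + 1) c a true
        constructor
        · rw [this.1]; push_cast [List.length_cons]; ring
        · rw [this.2]; simp [pairs, hadj]

theorem change_eq_filter (cs : List Char) (h : cs ≠ []) :
    ((PySem.List.pyRange 1 (cs.length : Int) 1).foldl (fun ch i =>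
        if PySem.Chars.isupper (PySem.List.pyGetD cs (i - 1) ' ')
             == PySem.Chars.islower (PySem.List.pyGetD cs i ' ') then ch ++ [i] else ch)
      (if PySem.Chars.isupper (PySem.List.pyGetD cs 0 ' ') then [0] else [])) =
    (PySem.List.pyRange 0 (cs.length : Int) 1).filter (condAt cs) := by
  have hlen : (0 : Int) < (cs.length : Int) := by
    exact_mod_cast List.length_pos_of_ne_nil h
  rw [PySem.List.pyRange_one_cons hlen]
  rw [List.filter_cons]
  have hfold := PySem.List.foldl_append_if_eq_filter (l := PySem.List.pyRange 1 (cs.length : Int) 1)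
    (p := fun i => PySem.Chars.isupper (PySem.List.pyGetD cs (i - 1) ' ')
             == PySem.Chars.islower (PySem.List.pyGetD cs i ' '))
    (acc := if PySem.Chars.isupper (PySem.List.pyGetD cs 0 ' ') then [0] else [])
  rw [hfold]
  have hcond0 : condAt cs 0 = PySem.Chars.isupper (PySem.List.pyGetD cs 0 ' ') := by
    simp [condAt]
  have hfilter : (PySem.List.pyRange 1 (cs.length : Int) 1).filter
      (fun i => PySem.Chars.isupper (PySem.List.pyGetD cs (i - 1) ' ')
             == PySem.Chars.islower (PySem.List.pyGetD cs i ' ')) =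
      (PySem.List.pyRange 1 (cs.length : Int) 1).filter (condAt cs) := by
    apply List.filter_congr
    intro i hi
    have h1 : (1 : Int) ≤ i := (PySem.List.mem_pyRange_one.mp hi).1
    simp only [condAt, if_neg (by omega : ¬ i = 0)]
  rw [hfilter, hcond0]
  by_cases h0 : PySem.Chars.isupper (PySem.List.pyGetD cs 0 ' ')
  · simp [h0]
  · simp [h0]

-- ===== VERDICT (by name: the statement is the Claim_ definition above) =====
theorem solve_spec : Claim_equal_solve := by
  intro string _ hpre
  unfold Spec_solve solve solve_alt
  have hcs : string.toList ≠ [] := by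
    intro hnil
    exact hpre (String.toList_eq_nil_iff.mp hnil)
  set cs := string.toList with hcsdef
  have hchg := change_eq_filter cs hcs
  simp only [hchg]
  set L := (PySem.List.pyRange 0 (cs.length : Int) 1).filter (condAt cs) with hL
  have hA : solveWhileA L L.length 0 0 = pairs L := by
    have := solveWhileA_eq_pairs L L.length 0 0 (Nat.le_add_left _ 0)
    simp at this
    exact this
  rw [hA]
  rw [foldl_stepB_filter cs _ (0, 0, -2, false), ← hL]
  have hB := foldl_tog_spec L 0 0 (-2) false
  rw [hB.1, hB.2]
  simp
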